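-- pv_equiv track=rewrite | github.com/Jinish2170/elliotAI | veritas/agents/vision.py | _select_primary_screenshot
-- ===== SOURCE A (Python) =====
-- from typing import Optional
--
-- def _select_primary_screenshot(
--     screenshots: list[str], labels: list[str]
-- ) -> Optional[str]:
--     """Select the best screenshot for static (non-temporal) analysis."""
--     # Prefer fullpage, then t0, then any
--     for preferred in ["fullpage", "t0", "subpage"]:
--         for path, label in zip(screenshots, labels):
--             if label == preferred:
--                 return path
--     return screenshots[0] if screenshots else None
-- ===== SOURCE B (Python) =====
-- from typing import Optional
--
-- _RANK = {"fullpage": 0, "t0": 1, "subpage": 2}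
--
-- def _select_primary_screenshot(
--     screenshots: list[str], labels: list[str]
-- ) -> Optional[str]:
--     """Select the best screenshot for static (non-temporal) analysis."""
--     best_path = None
--     best_rank = 3
--     for path, label in zip(screenshots, labels):
--         r = _RANK.get(label)
--         if r is not None and r < best_rank:
--             best_path = path
--             best_rank = r
--     if best_path is not None:
--         return best_path
--     return screenshots[0] if screenshots else None
-- ===== Notes on version B (the rewrite author's own statement) =====
-- stated objective: alternative
-- what changed: Replaces A's three restarted scans over zip(screenshots, labels) (one per preferred label, with early return) by a single accumulating pass that keeps the best path seen so far under a rank dict, using strict '<' to preserve A's first-occurrence tie-break.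
import Mathlib
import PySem

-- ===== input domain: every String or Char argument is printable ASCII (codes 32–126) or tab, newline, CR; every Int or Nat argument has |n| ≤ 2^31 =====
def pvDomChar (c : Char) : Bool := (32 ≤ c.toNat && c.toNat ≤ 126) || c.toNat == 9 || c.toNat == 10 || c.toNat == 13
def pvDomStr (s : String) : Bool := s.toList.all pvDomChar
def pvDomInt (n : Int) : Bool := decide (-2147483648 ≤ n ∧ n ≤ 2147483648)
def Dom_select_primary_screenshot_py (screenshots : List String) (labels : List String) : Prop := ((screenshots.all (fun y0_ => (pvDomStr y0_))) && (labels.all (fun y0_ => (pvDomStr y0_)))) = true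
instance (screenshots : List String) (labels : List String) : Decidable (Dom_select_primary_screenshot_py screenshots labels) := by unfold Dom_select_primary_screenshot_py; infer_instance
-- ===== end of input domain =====

-- B replaces A's three restarted scans of zip(screenshots, labels) with a single accumulating
-- pass keeping the best-ranked path seen so far (rank dict; strict '<' keeps A's first-occurrence
-- tie-break); same cost, different decomposition.

-- ===== PORT A =====
-- inner loop: `for path, label in zip(...): if label == preferred: return path`
def pvFindPref : List (String × String) → String → Option String
  | [], _ => none
  | (path, label) :: rest, preferred =>
      if label == preferred then some path else pvFindPref rest preferred

-- outer loop: `for preferred in ["fullpage", "t0", "subpage"]`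
def pvOuter : List String → List (String × String) → Option String
  | [], _ => none
  | p :: ps, pairs =>
      match pvFindPref pairs p with
      | some x => some x
      | none => pvOuter ps pairs

def select_primary_screenshot_py (screenshots : List String) (labels : List String) : Option String :=
  match pvOuter ["fullpage", "t0", "subpage"] (screenshots.zip labels) with
  | some x => some x
  | none => match screenshots with
            | [] => none
            | s :: _ => some s

-- ===== PORT B =====
def pvRank : PySem.Dict String Int := PySem.Dict.ofList [("fullpage", 0), ("t0", 1), ("subpage", 2)]

def pvStep (st : Option String × Int) (pl : String × String) : Option String × Int :=
  match PySem.Dict.get? pvRank pl.2 with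
  | some r => if r < st.2 then (some pl.1, r) else st
  | none => st

def select_primary_screenshot_py_alt (screenshots : List String) (labels : List String) : Option String :=
  let st := (screenshots.zip labels).foldl pvStep (none, 3)
  match st.1 with
  | some p => some p
  | none => match screenshots with
            | [] => none
            | s :: _ => some s

-- ===== PRECONDITION & SPEC =====
def Spec_select_primary_screenshot_py (screenshots : List String) (labels : List String) (out : Option String) : Prop := out = select_primary_screenshot_py_alt screenshots labels
instance (screenshots : List String) (labels : List String) (out : Option String) : Decidable (Spec_select_primary_screenshot_py screenshots labels out) := by unfold Spec_select_primary_screenshot_py; infer_instance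

-- ===== CLAIM (what is proved, stated in full; the proofs are below) =====
def Claim_equal_select_primary_screenshot_py : Prop := ∀ (screenshots : List String) (labels : List String), Dom_select_primary_screenshot_py screenshots labels → Spec_select_primary_screenshot_py screenshots labels (select_primary_screenshot_py screenshots labels)

-- ===== LEMMAS AND PROOFS =====

theorem pvRank_get (l : String) :
    PySem.Dict.get? pvRank l =
      if l == "fullpage" then some 0
      else if l == "t0" then some 1
      else if l == "subpage" then some 2 else none := by
  have h : pvRank = PySem.Dict.mk [("fullpage", 0), ("t0", 1), ("subpage", 2)] := by rfl
  rw [h]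
  by_cases h0 : l = "fullpage"
  · subst h0; rfl
  · by_cases h1 : l = "t0"
    · subst h1; rfl
    · by_cases h2 : l = "subpage"
      · subst h2; rfl
      · have e0 : ("fullpage" == l) = false := beq_eq_false_iff_ne.mpr fun e => h0 e.symm
        have e1 : ("t0" == l) = false := beq_eq_false_iff_ne.mpr fun e => h1 e.symm
        have e2 : ("subpage" == l) = false := beq_eq_false_iff_ne.mpr fun e => h2 e.symm
        simp [PySem.Dict.get?, List.find?, e0, e1, e2, h0, h1, h2]

-- characterisation of B's fold from an arbitrary state
theorem pvFold_spec (L : List (String × String)) (b : Option String) (r : Int) :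
    L.foldl pvStep (b, r) =
      if 0 < r ∧ (pvFindPref L "fullpage").isSome then (pvFindPref L "fullpage", 0)
      else if 1 < r ∧ (pvFindPref L "t0").isSome then (pvFindPref L "t0", 1)
      else if 2 < r ∧ (pvFindPref L "subpage").isSome then (pvFindPref L "subpage", 2)
      else (b, r) := by
  induction L generalizing b r with
  | nil => simp [pvFindPref]
  | cons hd tl ih =>
      obtain ⟨p, l⟩ := hd
      by_cases h0 : l = "fullpage"
      · subst h0
        simp only [List.foldl_cons, pvStep, pvRank_get]
        simp [pvFindPref, ih]
        split_ifs <;> simp_all <;> omega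
      · by_cases h1 : l = "t0"
        · subst h1
          simp only [List.foldl_cons, pvStep, pvRank_get]
          simp [pvFindPref, ih]
          split_ifs <;> simp_all <;> omega
        · by_cases h2 : l = "subpage"
          · subst h2
            simp only [List.foldl_cons, pvStep, pvRank_get]
            simp [pvFindPref, ih]
            split_ifs <;> simp_all <;> omega
          · simp only [List.foldl_cons, pvStep, pvRank_get]
            simp [pvFindPref, h0, h1, h2, ih]

-- ===== VERDICT (by name: the statement is the Claim_ definition above) =====
theorem select_primary_screenshot_py_spec : Claim_equal_select_primary_screenshot_py := by
  intro screenshots labels _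
  unfold Spec_select_primary_screenshot_py select_primary_screenshot_py select_primary_screenshot_py_alt
  simp only [pvOuter, pvFold_spec]
  split_ifs with hf ht hs <;>
    simp_all [Option.isSome_iff_exists] <;>
    cases hfp : pvFindPref (screenshots.zip labels) "fullpage" <;>
    cases htp : pvFindPref (screenshots.zip labels) "t0" <;>
    cases hsp : pvFindPref (screenshots.zip labels) "subpage" <;>
    simp_all
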